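-- pv_equiv track=rewrite | github.com/ddodon/BOJ | 백준/Gold/16935. 배열 돌리기 3/배열 돌리기 3.py | cal_6
-- ===== SOURCE A (Python) =====
-- def cal_6(arr):
--     N = len(arr)
--     M = len(arr[0])
--     nrr = [[0] * M for _ in range(N)]
--     for i in range(N // 2):
--         for j in range(M // 2):
--             nrr[i + N // 2][j] = arr[i][j]
--
--     for i in range(N // 2):
--         for j in range(M // 2, M):
--             nrr[i][j - M // 2] = arr[i][j]
--
--     for i in range(N // 2, N):
--         for j in range(M // 2, M):
--             nrr[i - N // 2][j] = arr[i][j]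
--
--     for i in range(N // 2, N):
--         for j in range(M // 2):
--             nrr[i][j + M // 2] = arr[i][j]
--     return nrr
-- ===== SOURCE B (Python) =====
-- def cal_6(arr):
--     N = len(arr)
--     M = len(arr[0])
--     h, w = N // 2, M // 2
--
--     def cell(r, c):
--         if h <= r and w <= c < 2 * w:
--             return arr[r][c - w]
--         if r < N - h and w <= c:
--             return arr[r + h][c]
--         if r < h and c < w:
--             return arr[r][c + w]
--         if h <= r < 2 * h and c < w:
--             return arr[r - h][c]
--         return 0
--
--     return [[cell(r, c) for c in range(M)] for r in range(N)]
-- ===== Notes on version B (the rewrite author's own statement) =====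
-- stated objective: alternative
-- what changed: B builds each output row directly by a per-cell region-case gather (deciding for every cell which quadrant move supplies it, last-write-wins), instead of A's allocation of a zeroed N x M buffer followed by four nested scatter loops copying the quadrants.
import Mathlib
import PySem

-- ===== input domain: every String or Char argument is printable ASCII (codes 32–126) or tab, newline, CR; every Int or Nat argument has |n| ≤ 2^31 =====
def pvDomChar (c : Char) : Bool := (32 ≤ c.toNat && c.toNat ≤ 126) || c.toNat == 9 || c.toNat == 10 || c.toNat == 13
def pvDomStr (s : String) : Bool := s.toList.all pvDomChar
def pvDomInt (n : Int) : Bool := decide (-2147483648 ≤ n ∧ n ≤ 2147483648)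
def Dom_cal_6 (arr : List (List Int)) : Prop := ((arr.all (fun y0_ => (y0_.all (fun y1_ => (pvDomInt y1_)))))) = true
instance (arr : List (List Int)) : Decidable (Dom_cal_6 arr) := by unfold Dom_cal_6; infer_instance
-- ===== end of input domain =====

-- B replaces A's zeroed buffer and four quadrant scatter loops by a direct per-cell
-- gather: each output row is built by a region-case lookup (objective: alternative,
-- same O(N*M) cost).

-- ===== PORT A =====
-- arr[i][j] (a read Python would raise IndexError on when out of range); exact under
-- Pre_cal_6, which keeps every read index in range.
def pvGet (m : List (List Int)) (r c : Nat) : Int := (m.getD r []).getD c 0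

-- nrr[r][c] = v ; both indices are always in range of nrr in A's loops.
def pvWrite (m : List (List Int)) (r c : Nat) (v : Int) : List (List Int) :=
  m.modify r (fun row => row.set c v)

-- inner 'for j in range(a2, a2+n2): nrr[ri][κ j] = v j'
def pvRow (ri : Nat) (κ : Nat → Nat) (v : Nat → Int) (a2 n2 : Nat)
    (m : List (List Int)) : List (List Int) :=
  (List.range' a2 n2).foldl (fun nrr j => pvWrite nrr ri (κ j) (v j)) m

-- one of A's double loops: 'for i in range(a1, a1+n1): for j in range(a2, a2+n2): nrr[ρ i][κ j] = arr[i][j]'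
def pvLoop (arr : List (List Int)) (ρ κ : Nat → Nat) (a1 n1 a2 n2 : Nat)
    (m : List (List Int)) : List (List Int) :=
  (List.range' a1 n1).foldl (fun nrr i => pvRow (ρ i) κ (pvGet arr i) a2 n2 nrr) m

def cal_6 (arr : List (List Int)) : List (List Int) :=
  let N := arr.length
  let M := (arr.headD []).length   -- len(arr[0]); Python raises on arr = [], excluded by Pre_
  let nrr0 := List.replicate N (List.replicate M (0:Int))
  -- for i in range(N//2):     for j in range(M//2):    nrr[i + N//2][j]     = arr[i][j]
  let nrr1 := pvLoop arr (fun i => i + N/2) (fun j => j) 0 (N/2) 0 (M/2) nrr0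
  -- for i in range(N//2):     for j in range(M//2, M): nrr[i][j - M//2]     = arr[i][j]
  let nrr2 := pvLoop arr (fun i => i) (fun j => j - M/2) 0 (N/2) (M/2) (M - M/2) nrr1
  -- for i in range(N//2, N):  for j in range(M//2, M): nrr[i - N//2][j]     = arr[i][j]
  let nrr3 := pvLoop arr (fun i => i - N/2) (fun j => j) (N/2) (N - N/2) (M/2) (M - M/2) nrr2
  -- for i in range(N//2, N):  for j in range(M//2):    nrr[i][j + M//2]     = arr[i][j]
  let nrr4 := pvLoop arr (fun i => i) (fun j => j + M/2) (N/2) (N - N/2) 0 (M/2) nrr3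
  nrr4

-- ===== PORT B =====
def cal_6_alt (arr : List (List Int)) : List (List Int) :=
  let N := arr.length
  let M := (arr.headD []).length   -- len(arr[0]); Python raises on arr = [], excluded by Pre_
  let h := N / 2
  let w := M / 2
  let cell : Nat → Nat → Int := fun r c =>
    if h ≤ r ∧ w ≤ c ∧ c < 2*w then pvGet arr r (c - w)
    else if r < N - h ∧ w ≤ c then pvGet arr (r + h) c
    else if r < h ∧ c < w then pvGet arr r (c + w)
    else if h ≤ r ∧ r < 2*h ∧ c < w then pvGet arr (r - h) c
    else 0
  (List.range N).map (fun r => (List.range M).map (fun c => cell r c))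

-- ===== PRECONDITION & SPEC =====
-- Pre_ excludes exactly the inputs on which Python A raises IndexError:
-- the empty list (arr[0]) and arrays with a row shorter than row 0 (arr[i][j]).
def Pre_cal_6 (arr : List (List Int)) : Prop :=
  arr ≠ [] ∧ ∀ row ∈ arr, (arr.headD []).length ≤ row.length
instance (arr : List (List Int)) : Decidable (Pre_cal_6 arr) := by unfold Pre_cal_6; infer_instance
def pvWitness_cal_6 : List (List Int) := [[1, 2], [3, 4]]

def Spec_cal_6 (arr : List (List Int)) (out : List (List Int)) : Prop := out = cal_6_alt arr
instance (arr : List (List Int)) (out : List (List Int)) : Decidable (Spec_cal_6 arr out) := by unfold Spec_cal_6; infer_instance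

-- ===== CLAIM (what is proved, stated in full; the proofs are below) =====
def Claim_equal_cal_6 : Prop := ∀ (arr : List (List Int)), Dom_cal_6 arr → Pre_cal_6 arr → Spec_cal_6 arr (cal_6 arr)

-- ===== LEMMAS AND PROOFS =====

-- B's per-cell case analysis, as a named function of the proof layer
def pvCell (arr : List (List Int)) (N M h w r c : Nat) : Int :=
  if h ≤ r ∧ w ≤ c ∧ c < 2*w then pvGet arr r (c - w)
  else if r < N - h ∧ w ≤ c then pvGet arr (r + h) c
  else if r < h ∧ c < w then pvGet arr r (c + w)
  else if h ≤ r ∧ r < 2*h ∧ c < w then pvGet arr (r - h) c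
  else 0

theorem cal_6_alt_eq (arr : List (List Int)) :
    cal_6_alt arr = (List.range arr.length).map (fun r =>
      (List.range (arr.headD []).length).map (fun c =>
        pvCell arr arr.length (arr.headD []).length (arr.length/2)
          ((arr.headD []).length/2) r c)) := rfl

theorem cal_6_eq_loops (arr : List (List Int)) : cal_6 arr =
    pvLoop arr (fun i => i) (fun j => j + (arr.headD []).length/2)
      (arr.length/2) (arr.length - arr.length/2) 0 ((arr.headD []).length/2)
     (pvLoop arr (fun i => i - arr.length/2) (fun j => j)
        (arr.length/2) (arr.length - arr.length/2)
        ((arr.headD []).length/2) ((arr.headD []).length - (arr.headD []).length/2)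
      (pvLoop arr (fun i => i) (fun j => j - (arr.headD []).length/2)
         0 (arr.length/2)
         ((arr.headD []).length/2) ((arr.headD []).length - (arr.headD []).length/2)
       (pvLoop arr (fun i => i + arr.length/2) (fun j => j)
          0 (arr.length/2) 0 ((arr.headD []).length/2)
        (List.replicate arr.length (List.replicate (arr.headD []).length (0:Int)))))) := rfl

theorem pvRow_succ (ri : Nat) (kp : Nat → Nat) (v : Nat → Int) (a2 n : Nat)
    (m : List (List Int)) :
    pvRow ri kp v a2 (n+1) m = pvRow ri kp v (a2+1) n (pvWrite m ri (kp a2) (v a2)) := by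
  simp [pvRow, List.range'_succ]

theorem pvLoop_succ (arr : List (List Int)) (rp kp : Nat → Nat) (a1 n a2 n2 : Nat)
    (m : List (List Int)) :
    pvLoop arr rp kp a1 (n+1) a2 n2 m
      = pvLoop arr rp kp (a1+1) n a2 n2 (pvRow (rp a1) kp (pvGet arr a1) a2 n2 m) := by
  simp [pvLoop, List.range'_succ]

-- an N×M matrix shape, preserved by every write
def pvShape (m : List (List Int)) (N M : Nat) : Prop :=
  m.length = N ∧ ∀ r, r < N → (m.getD r []).length = M

theorem pvShape_replicate (N M : Nat) :
    pvShape (List.replicate N (List.replicate M (0:Int))) N M := by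
  refine ⟨by simp, fun r hr => ?_⟩
  simp [List.getD_eq_getElem?_getD, hr]

theorem pvWrite_row_length (m : List (List Int)) (r c : Nat) (v : Int) (r' : Nat) :
    ((pvWrite m r c v).getD r' []).length = (m.getD r' []).length := by
  simp only [pvWrite, List.getD_eq_getElem?_getD, List.getElem?_modify]
  cases hx : m[r']? with
  | none => simp
  | some row => by_cases h : r = r' <;> simp [h]

theorem pvShape_pvWrite {m : List (List Int)} {N M : Nat} (hm : pvShape m N M)
    (r c : Nat) (v : Int) : pvShape (pvWrite m r c v) N M := by
  refine ⟨by simpa [pvWrite] using hm.1, fun r' hr' => ?_⟩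
  rw [pvWrite_row_length]
  exact hm.2 r' hr'

theorem pvGet_pvWrite_hit {m : List (List Int)} {r c : Nat} (v : Int)
    (hr : r < m.length) (hc : c < (m.getD r []).length) :
    pvGet (pvWrite m r c v) r c = v := by
  have hrow : m[r]? = some m[r] := List.getElem?_eq_getElem hr
  have hc' : c < m[r].length := by
    rwa [List.getD_eq_getElem?_getD, hrow, Option.getD_some] at hc
  simp [pvGet, pvWrite, List.getD_eq_getElem?_getD, hrow, hc']

theorem pvGet_pvWrite_miss {m : List (List Int)} {r c r' c' : Nat} (v : Int)
    (h : r' ≠ r ∨ c' ≠ c) :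
    pvGet (pvWrite m r c v) r' c' = pvGet m r' c' := by
  rcases h with h | h
  · simp only [pvGet, pvWrite, List.getD_eq_getElem?_getD, List.getElem?_modify]
    cases hx : m[r']? <;> simp [Ne.symm h]
  · simp only [pvGet, pvWrite, List.getD_eq_getElem?_getD, List.getElem?_modify]
    by_cases hr : r = r' <;> cases hx : m[r']? <;>
      simp_all [Ne.symm h]

theorem pvShape_pvRow {N M : Nat} (ri : Nat) (kp : Nat → Nat) (v : Nat → Int)
    (a2 n2 : Nat) {m : List (List Int)} (hm : pvShape m N M) :
    pvShape (pvRow ri kp v a2 n2 m) N M := by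
  induction n2 generalizing a2 m with
  | zero => simpa [pvRow] using hm
  | succ n ih =>
    rw [pvRow_succ]
    exact ih (a2 + 1) (pvShape_pvWrite hm _ _ _)

theorem pvRow_miss {ri : Nat} {kp : Nat → Nat} {v : Nat → Int} {a2 n2 : Nat}
    {m : List (List Int)} {r c : Nat}
    (h : ∀ j, a2 ≤ j → j < a2 + n2 → ¬(ri = r ∧ kp j = c)) :
    pvGet (pvRow ri kp v a2 n2 m) r c = pvGet m r c := by
  induction n2 generalizing a2 m with
  | zero => simp [pvRow]
  | succ n ih =>
    rw [pvRow_succ]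
    have step : pvGet (pvWrite m ri (kp a2) (v a2)) r c = pvGet m r c := by
      apply pvGet_pvWrite_miss
      have hna := h a2 (le_refl _) (by omega)
      by_cases hr : r = ri
      · right; intro hcc; exact hna ⟨hr.symm, hcc.symm⟩
      · left; exact hr
    rw [← step]
    exact ih (fun j hj1 hj2 => h j (by omega) (by omega))

theorem pvRow_hit {N M : Nat} {ri : Nat} {kp : Nat → Nat} {v : Nat → Int}
    {a2 n2 : Nat} {m : List (List Int)} (hm : pvShape m N M)
    {j c : Nat} (hj1 : a2 ≤ j) (hj2 : j < a2 + n2)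
    (hri : ri < N) (hc' : kp j = c) (hc : c < M)
    (hkinj : ∀ j', a2 ≤ j' → j' < a2 + n2 → kp j' = c → j' = j) :
    pvGet (pvRow ri kp v a2 n2 m) ri c = v j := by
  subst hc'
  induction n2 generalizing a2 m with
  | zero => omega
  | succ n ih =>
    rw [pvRow_succ]
    by_cases hja : j = a2
    · subst hja
      have hmiss : ∀ j', j+1 ≤ j' → j' < (j+1) + n → ¬(ri = ri ∧ kp j' = kp j) := by
        intro j' h1 h2 hp
        have := hkinj j' (by omega) (by omega) hp.2
        omega
      rw [pvRow_miss hmiss]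
      exact pvGet_pvWrite_hit _ (by rw [hm.1]; exact hri)
        (by rw [hm.2 ri hri]; exact hc)
    · exact ih (pvShape_pvWrite hm _ _ _) (by omega) (by omega)
        (fun j' h1 h2 h3 => hkinj j' (by omega) (by omega) h3)

theorem pvShape_pvLoop {N M : Nat} (arr : List (List Int)) (rp kp : Nat → Nat)
    (a1 n1 a2 n2 : Nat) {m : List (List Int)} (hm : pvShape m N M) :
    pvShape (pvLoop arr rp kp a1 n1 a2 n2 m) N M := by
  induction n1 generalizing a1 m with
  | zero => simpa [pvLoop] using hm
  | succ n ih =>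
    rw [pvLoop_succ]
    exact ih (a1 + 1) (pvShape_pvRow _ _ _ _ _ hm)

theorem pvLoop_miss {arr : List (List Int)} {rp kp : Nat → Nat} {a1 n1 a2 n2 : Nat}
    {m : List (List Int)} {r c : Nat}
    (h : ∀ i j, a1 ≤ i → i < a1 + n1 → a2 ≤ j → j < a2 + n2 → ¬(rp i = r ∧ kp j = c)) :
    pvGet (pvLoop arr rp kp a1 n1 a2 n2 m) r c = pvGet m r c := by
  induction n1 generalizing a1 m with
  | zero => simp [pvLoop]
  | succ n ih =>
    rw [pvLoop_succ]
    have step : pvGet (pvRow (rp a1) kp (pvGet arr a1) a2 n2 m) r c = pvGet m r c :=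
      pvRow_miss (fun j hj1 hj2 hp =>
        h a1 j (le_refl _) (by omega) hj1 hj2 ⟨hp.1, hp.2⟩)
    rw [← step]
    exact ih (fun i j h1 h2 h3 h4 => h i j (by omega) (by omega) h3 h4)

theorem pvLoop_hit {N M : Nat} {arr : List (List Int)} {rp kp : Nat → Nat}
    {a1 n1 a2 n2 : Nat} {m : List (List Int)} (hm : pvShape m N M)
    {i j r c : Nat} (hi1 : a1 ≤ i) (hi2 : i < a1 + n1)
    (hj1 : a2 ≤ j) (hj2 : j < a2 + n2)
    (hr' : rp i = r) (hc' : kp j = c) (hrN : r < N) (hcM : c < M)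
    (hrinj : ∀ i', a1 ≤ i' → i' < a1 + n1 → rp i' = r → i' = i)
    (hkinj : ∀ j', a2 ≤ j' → j' < a2 + n2 → kp j' = c → j' = j) :
    pvGet (pvLoop arr rp kp a1 n1 a2 n2 m) r c = pvGet arr i j := by
  subst hr'
  induction n1 generalizing a1 m with
  | zero => omega
  | succ n ih =>
    rw [pvLoop_succ]
    by_cases hia : i = a1
    · subst hia
      have hmiss : ∀ i' j', i+1 ≤ i' → i' < (i+1) + n → a2 ≤ j' → j' < a2 + n2 →
          ¬(rp i' = rp i ∧ kp j' = c) := by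
        intro i' j' h1 h2 h3 h4 hp
        have := hrinj i' (by omega) (by omega) hp.1
        omega
      rw [pvLoop_miss hmiss]
      exact pvRow_hit hm hj1 hj2 hrN hc' hcM hkinj
    · exact ih (pvShape_pvRow _ _ _ _ _ hm) (by omega) (by omega)
        (fun i' h1 h2 h3 => hrinj i' (by omega) (by omega) h3)

-- the value of A's final buffer at any in-range cell is B's case analysis
theorem cal_6_entry (arr : List (List Int)) (r c : Nat)
    (hr : r < arr.length) (hc : c < (arr.headD []).length) :
    pvGet (cal_6 arr) r c =
      pvCell arr arr.length (arr.headD []).length (arr.length/2)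
        ((arr.headD []).length/2) r c := by
  rw [cal_6_eq_loops]
  set N := arr.length with hN
  set M := (arr.headD []).length with hM
  set h := N / 2 with hh
  set w := M / 2 with hw
  set m0 := List.replicate N (List.replicate M (0:Int)) with hm0
  have s0 : pvShape m0 N M := pvShape_replicate N M
  set m1 := pvLoop arr (fun i => i + h) (fun j => j) 0 h 0 w m0 with hm1
  have s1 : pvShape m1 N M := pvShape_pvLoop _ _ _ _ _ _ _ s0
  set m2 := pvLoop arr (fun i => i) (fun j => j - w) 0 h w (M - w) m1 with hm2
  have s2 : pvShape m2 N M := pvShape_pvLoop _ _ _ _ _ _ _ s1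
  set m3 := pvLoop arr (fun i => i - h) (fun j => j) h (N - h) w (M - w) m2 with hm3
  have s3 : pvShape m3 N M := pvShape_pvLoop _ _ _ _ _ _ _ s2
  have hzero : pvGet m0 r c = 0 := by
    rw [hm0]
    simp [pvGet, List.getD_eq_getElem?_getD, hr, hc]
  rw [pvCell]
  by_cases b1 : h ≤ r ∧ w ≤ c ∧ c < 2*w
  · -- fourth loop wins here: i := r, j := c - w
    rw [if_pos b1]
    exact pvLoop_hit s3 (i := r) (j := c - w)
      (by omega) (by omega) (by omega) (by omega)
      rfl (by show c - w + w = c; omega) hr (by omega)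
      (fun i' h1 h2 hp => hp)
      (fun j' h1 h2 hp => by have hp' : j' + w = c := hp; omega)
  · rw [if_neg b1]
    have miss4 : pvGet (pvLoop arr (fun i => i) (fun j => j + w) h (N - h) 0 w m3) r c
        = pvGet m3 r c := by
      apply pvLoop_miss
      intro i j h1 h2 h3 h4 hp
      have hpi : i = r := hp.1
      have hpj : j + w = c := hp.2
      exact b1 ⟨by omega, by omega, by omega⟩
    rw [miss4]
    by_cases b2 : r < N - h ∧ w ≤ c
    · -- third loop: i := r + h, j := c
      rw [if_pos b2]
      exact pvLoop_hit s2 (i := r + h) (j := c)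
        (by omega) (by omega) (by omega) (by omega)
        (by show r + h - h = r; omega) rfl (by omega) hc
        (fun i' h1 h2 hp => by have hp' : i' - h = r := hp; omega)
        (fun j' h1 h2 hp => hp)
    · rw [if_neg b2]
      have miss3 : pvGet m3 r c = pvGet m2 r c := by
        rw [hm3]
        apply pvLoop_miss
        intro i j h1 h2 h3 h4 hp
        have hpi : i - h = r := hp.1
        have hpj : j = c := hp.2
        exact b2 ⟨by omega, by omega⟩
      rw [miss3]
      by_cases b3 : r < h ∧ c < w
      · -- second loop: i := r, j := c + w
        rw [if_pos b3]
        exact pvLoop_hit s1 (i := r) (j := c + w)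
          (by omega) (by omega) (by omega) (by omega)
          rfl (by show c + w - w = c; omega) hr (by omega)
          (fun i' h1 h2 hp => hp)
          (fun j' h1 h2 hp => by have hp' : j' - w = c := hp; omega)
      · rw [if_neg b3]
        have miss2 : pvGet m2 r c = pvGet m1 r c := by
          rw [hm2]
          apply pvLoop_miss
          intro i j h1 h2 h3 h4 hp
          have hpi : i = r := hp.1
          have hpj : j - w = c := hp.2
          by_cases hcw : c < w
          · exact b3 ⟨by omega, hcw⟩
          · exact b2 ⟨by omega, by omega⟩
        rw [miss2]
        by_cases b4 : h ≤ r ∧ r < 2*h ∧ c < w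
        · -- first loop: i := r - h, j := c
          rw [if_pos b4]
          exact pvLoop_hit s0 (i := r - h) (j := c)
            (by omega) (by omega) (by omega) (by omega)
            (by show r - h + h = r; omega) rfl hr (by omega)
            (fun i' h1 h2 hp => by have hp' : i' + h = r := hp; omega)
            (fun j' h1 h2 hp => hp)
        · rw [if_neg b4]
          have miss1 : pvGet m1 r c = pvGet m0 r c := by
            rw [hm1]
            apply pvLoop_miss
            intro i j h1 h2 h3 h4 hp
            have hpi : i + h = r := hp.1
            have hpj : j = c := hp.2
            exact b4 ⟨by omega, by omega, by omega⟩
          rw [miss1, hzero]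

theorem cal_6_eq_alt (arr : List (List Int)) : cal_6 arr = cal_6_alt arr := by
  have sA : pvShape (cal_6 arr) arr.length (arr.headD []).length := by
    rw [cal_6_eq_loops]
    exact pvShape_pvLoop _ _ _ _ _ _ _
      (pvShape_pvLoop _ _ _ _ _ _ _
        (pvShape_pvLoop _ _ _ _ _ _ _
          (pvShape_pvLoop _ _ _ _ _ _ _ (pvShape_replicate _ _))))
  apply List.ext_getElem
  · rw [sA.1, cal_6_alt_eq, List.length_map, List.length_range]
  · intro r h1 h2
    have hrN : r < arr.length := sA.1 ▸ h1
    have hrowlen : (cal_6 arr)[r].length = (arr.headD []).length := by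
      have := sA.2 r hrN
      rwa [List.getD_eq_getElem?_getD, List.getElem?_eq_getElem h1,
        Option.getD_some] at this
    simp only [cal_6_alt_eq, List.getElem_map, List.getElem_range]
    apply List.ext_getElem
    · rw [hrowlen, List.length_map, List.length_range]
    · intro c hc1 hc2
      have hcM : c < (arr.headD []).length := hrowlen ▸ hc1
      simp only [List.getElem_map, List.getElem_range]
      have e1 : (cal_6 arr).getD r [] = (cal_6 arr)[r] := by
        rw [List.getD_eq_getElem?_getD, List.getElem?_eq_getElem h1, Option.getD_some]
      have e2 : pvGet (cal_6 arr) r c = (cal_6 arr)[r][c] := by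
        simp only [pvGet]
        rw [e1, List.getD_eq_getElem?_getD, List.getElem?_eq_getElem hc1,
          Option.getD_some]
      rw [← cal_6_entry arr r c hrN hcM, e2]

-- ===== VERDICT (by name: the statement is the Claim_ definition above) =====
theorem cal_6_spec : Claim_equal_cal_6 := by
  intro arr _ _
  unfold Spec_cal_6
  exact cal_6_eq_alt arr
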